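-- pv_equiv track=rewrite | github.com/GOLISHYAMP/Dummy-final-year-project | app.py | convert
-- ===== SOURCE A (Python) =====
-- def convert(li):
--     fi = []
--     for i in range(10):
--         if str(i) in li:
--             fi.append(1)
--         else:
--             fi.append(0)
--     return fi
-- ===== SOURCE B (Python) =====
-- def convert(li):
--     fi = [0] * 10
--     digits = ('0', '1', '2', '3', '4', '5', '6', '7', '8', '9')
--     for c in li:
--         if c in digits:
--             fi[int(c)] = 1
--     return fi
-- ===== Notes on version B (the rewrite author's own statement) =====
-- stated objective: alternative
-- what changed: Single pass over the input filling a presence table (fi[int(c)]=1) instead of ten separate membership scans of li; same cost in practice since A's scans run at C speed.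
import Mathlib
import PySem

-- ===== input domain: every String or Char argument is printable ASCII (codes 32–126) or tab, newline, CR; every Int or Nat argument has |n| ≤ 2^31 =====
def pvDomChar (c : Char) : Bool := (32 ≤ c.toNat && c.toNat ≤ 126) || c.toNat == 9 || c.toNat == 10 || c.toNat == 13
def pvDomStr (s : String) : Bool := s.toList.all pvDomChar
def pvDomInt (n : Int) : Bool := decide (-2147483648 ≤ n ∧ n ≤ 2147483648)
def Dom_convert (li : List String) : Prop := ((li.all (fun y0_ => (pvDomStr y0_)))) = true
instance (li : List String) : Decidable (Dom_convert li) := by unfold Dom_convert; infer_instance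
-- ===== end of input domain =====

-- B replaces A's ten membership scans of li by a single pass filling a presence table (alternative decomposition, same cost).

-- ===== PORT A =====
-- for i in range(10): fi.append(1 if str(i) in li else 0)
def convert (li : List String) : List Int :=
  List.foldl (fun fi i => fi ++ [if (PySem.Int.toStr i) ∈ li then (1 : Int) else 0])
    [] (PySem.List.pyRange 0 10 1)

-- ===== PORT B =====
def pvDigits : List String := ["0", "1", "2", "3", "4", "5", "6", "7", "8", "9"]

-- for c in li: if c in digits: fi[int(c)] = 1
def convertStep (fi : List Int) (c : String) : List Int :=
  if c ∈ pvDigits then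
    match PySem.Int.ofStr? c with
    | some k => fi.set k.toNat 1
    | none => fi
  else fi

def convert_alt (li : List String) : List Int :=
  List.foldl convertStep (List.replicate 10 0) li

-- ===== PRECONDITION & SPEC =====
def Spec_convert (li : List String) (out : List Int) : Prop := out = convert_alt li
instance (li : List String) (out : List Int) : Decidable (Spec_convert li out) := by unfold Spec_convert; infer_instance

-- ===== CLAIM (what is proved, stated in full; the proofs are below) =====
def Claim_equal_convert : Prop := ∀ (li : List String), Dom_convert li → Spec_convert li (convert li)

-- ===== LEMMAS AND PROOFS =====

-- indicator of membership: the value each slot of both results carries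
def pvInd (li : List String) (s : String) (a : Int) : Int := if s ∈ li then 1 else a

-- invariant of B's loop on an explicit 10-slot state
lemma convert_alt_loop (li : List String) (a0 a1 a2 a3 a4 a5 a6 a7 a8 a9 : Int) :
    List.foldl convertStep [a0, a1, a2, a3, a4, a5, a6, a7, a8, a9] li =
      [pvInd li "0" a0, pvInd li "1" a1, pvInd li "2" a2, pvInd li "3" a3, pvInd li "4" a4,
       pvInd li "5" a5, pvInd li "6" a6, pvInd li "7" a7, pvInd li "8" a8, pvInd li "9" a9] := by
  induction li generalizing a0 a1 a2 a3 a4 a5 a6 a7 a8 a9 with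
  | nil => simp [pvInd]
  | cons c t ih =>
    by_cases h : c ∈ pvDigits
    · simp only [pvDigits, List.mem_cons, List.not_mem_nil, or_false] at h
      rcases h with rfl | rfl | rfl | rfl | rfl | rfl | rfl | rfl | rfl | rfl
      · have e : PySem.Int.ofStr? "0" = some 0 := by decide
        simp only [List.foldl_cons, convertStep, e]
        rw [if_pos (show ("0":String) ∈ pvDigits by decide)]
        simp only [show ((0:Int).toNat) = 0 from rfl, List.set]
        rw [ih]
        simp [pvInd, List.mem_cons]
      · have e : PySem.Int.ofStr? "1" = some 1 := by decide
        simp only [List.foldl_cons, convertStep, e]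
        rw [if_pos (show ("1":String) ∈ pvDigits by decide)]
        simp only [show ((1:Int).toNat) = 1 from rfl, List.set]
        rw [ih]
        simp [pvInd, List.mem_cons]
      · have e : PySem.Int.ofStr? "2" = some 2 := by decide
        simp only [List.foldl_cons, convertStep, e]
        rw [if_pos (show ("2":String) ∈ pvDigits by decide)]
        simp only [show ((2:Int).toNat) = 2 from rfl, List.set]
        rw [ih]
        simp [pvInd, List.mem_cons]
      · have e : PySem.Int.ofStr? "3" = some 3 := by decide
        simp only [List.foldl_cons, convertStep, e]
        rw [if_pos (show ("3":String) ∈ pvDigits by decide)]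
        simp only [show ((3:Int).toNat) = 3 from rfl, List.set]
        rw [ih]
        simp [pvInd, List.mem_cons]
      · have e : PySem.Int.ofStr? "4" = some 4 := by decide
        simp only [List.foldl_cons, convertStep, e]
        rw [if_pos (show ("4":String) ∈ pvDigits by decide)]
        simp only [show ((4:Int).toNat) = 4 from rfl, List.set]
        rw [ih]
        simp [pvInd, List.mem_cons]
      · have e : PySem.Int.ofStr? "5" = some 5 := by decide
        simp only [List.foldl_cons, convertStep, e]
        rw [if_pos (show ("5":String) ∈ pvDigits by decide)]
        simp only [show ((5:Int).toNat) = 5 from rfl, List.set]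
        rw [ih]
        simp [pvInd, List.mem_cons]
      · have e : PySem.Int.ofStr? "6" = some 6 := by decide
        simp only [List.foldl_cons, convertStep, e]
        rw [if_pos (show ("6":String) ∈ pvDigits by decide)]
        simp only [show ((6:Int).toNat) = 6 from rfl, List.set]
        rw [ih]
        simp [pvInd, List.mem_cons]
      · have e : PySem.Int.ofStr? "7" = some 7 := by decide
        simp only [List.foldl_cons, convertStep, e]
        rw [if_pos (show ("7":String) ∈ pvDigits by decide)]
        simp only [show ((7:Int).toNat) = 7 from rfl, List.set]
        rw [ih]
        simp [pvInd, List.mem_cons]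
      · have e : PySem.Int.ofStr? "8" = some 8 := by decide
        simp only [List.foldl_cons, convertStep, e]
        rw [if_pos (show ("8":String) ∈ pvDigits by decide)]
        simp only [show ((8:Int).toNat) = 8 from rfl, List.set]
        rw [ih]
        simp [pvInd, List.mem_cons]
      · have e : PySem.Int.ofStr? "9" = some 9 := by decide
        simp only [List.foldl_cons, convertStep, e]
        rw [if_pos (show ("9":String) ∈ pvDigits by decide)]
        simp only [show ((9:Int).toNat) = 9 from rfl, List.set]
        rw [ih]
        simp [pvInd, List.mem_cons]
    · have hstep : convertStep [a0, a1, a2, a3, a4, a5, a6, a7, a8, a9] c =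
          [a0, a1, a2, a3, a4, a5, a6, a7, a8, a9] := by
        simp [convertStep, h]
      have hne : ∀ s, s ∈ pvDigits → pvInd (c :: t) s = pvInd t s := by
        intro s hs
        funext a
        have hsc : s ≠ c := fun hsc => h (hsc ▸ hs)
        simp [pvInd, List.mem_cons, hsc]
      simp only [List.foldl_cons, hstep, ih]
      rw [hne "0" (by decide), hne "1" (by decide), hne "2" (by decide), hne "3" (by decide),
          hne "4" (by decide), hne "5" (by decide), hne "6" (by decide), hne "7" (by decide),
          hne "8" (by decide), hne "9" (by decide)]

lemma convert_eq_ind (li : List String) :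
    convert li =
      [pvInd li "0" 0, pvInd li "1" 0, pvInd li "2" 0, pvInd li "3" 0, pvInd li "4" 0,
       pvInd li "5" 0, pvInd li "6" 0, pvInd li "7" 0, pvInd li "8" 0, pvInd li "9" 0] := by
  have hr : PySem.List.pyRange 0 10 1 = [0, 1, 2, 3, 4, 5, 6, 7, 8, 9] := by decide
  simp [convert, hr, List.foldl, pvInd,
    show PySem.Int.toStr 0 = "0" from by decide, show PySem.Int.toStr 1 = "1" from by decide,
    show PySem.Int.toStr 2 = "2" from by decide, show PySem.Int.toStr 3 = "3" from by decide,
    show PySem.Int.toStr 4 = "4" from by decide, show PySem.Int.toStr 5 = "5" from by decide,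
    show PySem.Int.toStr 6 = "6" from by decide, show PySem.Int.toStr 7 = "7" from by decide,
    show PySem.Int.toStr 8 = "8" from by decide, show PySem.Int.toStr 9 = "9" from by decide]

-- ===== VERDICT (by name: the statement is the Claim_ definition above) =====
theorem convert_spec : Claim_equal_convert := by
  intro li _
  show convert li = convert_alt li
  rw [convert_eq_ind]
  show _ = List.foldl convertStep [0, 0, 0, 0, 0, 0, 0, 0, 0, 0] li
  rw [convert_alt_loop]
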